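-- pv_equiv track=rewrite | github.com/msauvee/avant-2021 | 03/game.py | compute_puzzle1
-- ===== SOURCE A (Python) =====
-- def compute_puzzle1(values) -> int:
--     length = len(values[0])
--     zero_count = [0] * length
--     one_count = [0] * length
--     for value in values:
--         for i in range(0, length):
--             if value[i] == '0':
--                 zero_count[i] += 1
--             else:
--                 one_count[i] += 1
--
--     gamma_rate = 0
--     epsilon_rate = 0
--     for i in range(0, length):
--         gamma_rate = gamma_rate * 2
--         epsilon_rate = epsilon_rate * 2
--         if (zero_count[i] > one_count[i]):
--             epsilon_rate += 1
--         else: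
--             gamma_rate += 1
--
--     return gamma_rate * epsilon_rate
-- ===== SOURCE B (Python) =====
-- def compute_puzzle1(values) -> int:
--     n = len(values)
--     gamma = 0
--     width = 0
--     for col in zip(*values):
--         bits = sorted(c != '0' for c in col)
--         gamma = 2 * gamma + (1 if bits[n // 2] else 0)
--         width += 1
--     epsilon = ((1 << width) - 1) - gamma
--     return gamma * epsilon
-- ===== Notes on version B (the rewrite author's own statement) =====
-- stated objective: alternative
-- what changed: B transposes the input with zip(*values) and, per column, sorts the boolean digits and reads the median element at index n//2 (sort-and-select instead of A's per-position zero/one counters and lockstep gamma/epsilon accumulation), then takes epsilon as the fixed-width complement (2^width - 1) - gamma.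
import Mathlib
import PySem

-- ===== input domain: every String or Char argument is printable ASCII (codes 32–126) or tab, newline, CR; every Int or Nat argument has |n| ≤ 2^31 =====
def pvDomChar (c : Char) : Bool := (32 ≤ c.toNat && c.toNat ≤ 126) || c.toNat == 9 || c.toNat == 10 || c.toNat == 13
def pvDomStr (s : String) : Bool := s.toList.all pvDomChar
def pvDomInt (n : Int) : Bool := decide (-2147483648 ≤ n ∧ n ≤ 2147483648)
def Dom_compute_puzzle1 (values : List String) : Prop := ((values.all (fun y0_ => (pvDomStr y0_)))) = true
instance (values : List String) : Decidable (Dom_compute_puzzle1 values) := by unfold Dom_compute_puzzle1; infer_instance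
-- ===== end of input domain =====

-- B transposes the input with zip, sorts each column's booleans and reads the median bit at
-- index n//2 for gamma, taking epsilon as the fixed-width complement (objective: alternative).


-- ===== PORT A =====
-- literal transliteration of Source A; the '0' defaults of pyGetD are never reached under Pre_
def compute_puzzle1 (values : List String) : Int :=
  let length : Int := PySem.Str.len (PySem.List.pyGetD values 0 "")
  let init : List Int × List Int :=
    (PySem.List.pyRepeat [(0 : Int)] length, PySem.List.pyRepeat [(0 : Int)] length)
  let counts : List Int × List Int :=
    values.foldl (fun zo value =>
      (PySem.List.pyRange 0 length 1).foldl (fun zo i =>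
        if PySem.List.pyGetD value.toList i '0' = '0' then
          (PySem.List.pySetD zo.1 i (PySem.List.pyGetD zo.1 i 0 + 1), zo.2)
        else
          (zo.1, PySem.List.pySetD zo.2 i (PySem.List.pyGetD zo.2 i 0 + 1))) zo) init
  let ge : Int × Int :=
    (PySem.List.pyRange 0 length 1).foldl (fun ge i =>
      let gamma_rate := ge.1 * 2
      let epsilon_rate := ge.2 * 2
      if PySem.List.pyGetD counts.1 i 0 > PySem.List.pyGetD counts.2 i 0 then
        (gamma_rate, epsilon_rate + 1)
      else
        (gamma_rate + 1, epsilon_rate)) (0, 0)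
  ge.1 * ge.2

-- ===== PORT B =====
-- hand port of Python's zip(*values): the list of columns, one per index below the minimum
-- string length; exact because every column index is below every string's length, so the
-- ' ' default of getD is never reached
def pvMinLen (values : List String) : Nat :=
  match values with
  | [] => 0
  | v :: vs => vs.foldl (fun m w => min m w.toList.length) v.toList.length

def pvZipCols (values : List String) : List (List Char) :=
  (List.range (pvMinLen values)).map (fun k => values.map (fun v => v.toList.getD k ' '))

-- literal transliteration of Source B; sorted() ported as PySem.List.sorted; the 'false' default
-- of pyGetD is never reached under Pre_ (n ≥ 1 and each column has n entries)
def compute_puzzle1_alt (values : List String) : Int :=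
  let n : Int := (values.length : Int)
  let gw : Int × Int :=
    (pvZipCols values).foldl (fun gw col =>
      let bits : List Bool :=
        PySem.List.sorted (col.map (fun c => decide (c ≠ '0'))) (fun x => x) false
      (2 * gw.1 + (if PySem.List.pyGetD bits (PySem.Int.floordiv n 2) false then 1 else 0),
       gw.2 + 1)) (0, 0)
  let epsilon : Int := ((1 : Int) <<< gw.2.toNat - 1) - gw.1
  gw.1 * epsilon

-- ===== PRECONDITION & SPEC =====
-- Pre_ excludes exactly the inputs where Python A raises IndexError: the empty list
-- (values[0]) and lists whose first string is longer than some other string (value[i]).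
def Pre_compute_puzzle1 (values : List String) : Prop :=
  values ≠ [] ∧ ∀ v ∈ values, (values.headD "").toList.length ≤ v.toList.length
instance (values : List String) : Decidable (Pre_compute_puzzle1 values) := by
  unfold Pre_compute_puzzle1; infer_instance

def pvWitness_compute_puzzle1 : List String := ["01", "10", "11"]

def Spec_compute_puzzle1 (values : List String) (out : Int) : Prop := out = compute_puzzle1_alt values
instance (values : List String) (out : Int) : Decidable (Spec_compute_puzzle1 values out) := by unfold Spec_compute_puzzle1; infer_instance

-- ===== CLAIM (what is proved, stated in full; the proofs are below) =====
def Claim_equal_compute_puzzle1 : Prop := ∀ (values : List String), Dom_compute_puzzle1 values → Pre_compute_puzzle1 values → Spec_compute_puzzle1 values (compute_puzzle1 values)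
-- ===== LEMMAS AND PROOFS =====

-- per-position digit counts (ones = characters ≠ '0', zeros = characters = '0')
def pvOnesAt (values : List String) (k : Nat) : Int :=
  (values.countP (fun v => !decide (v.toList.getD k '0' = '0')) : Int)

def pvZerosAt (values : List String) (k : Nat) : Int :=
  (values.countP (fun v => decide (v.toList.getD k '0' = '0')) : Int)

-- one step of A's inner counting loop, on Nat indices
def pvStep (v : List Char) (zo : List Int × List Int) (k : Nat) : List Int × List Int :=
  if v.getD k '0' = '0' then (zo.1.set k (zo.1.getD k 0 + 1), zo.2)
  else (zo.1, zo.2.set k (zo.2.getD k 0 + 1))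

lemma pvCountP_split {α : Type} (xs : List α) (p : α → Bool) :
    xs.countP p + xs.countP (fun x => !p x) = xs.length := by
  induction xs with
  | nil => simp
  | cons h t ih => by_cases hp : p h <;> simp [hp] <;> omega

-- A's inner pyRange fold is the Nat-indexed fold of pvStep
lemma pvInner_bridge (v : List Char) (L : Nat) (zo : List Int × List Int) :
    (PySem.List.pyRange 0 (L : Int) 1).foldl (fun zo i =>
        if PySem.List.pyGetD v i '0' = '0' then
          (PySem.List.pySetD zo.1 i (PySem.List.pyGetD zo.1 i 0 + 1), zo.2)
        else
          (zo.1, PySem.List.pySetD zo.2 i (PySem.List.pyGetD zo.2 i 0 + 1))) zo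
      = (List.range L).foldl (pvStep v) zo := by
  rw [PySem.List.pyRange_zero_nat, List.foldl_map]
  apply PySem.List.foldl_congr_mem
  intro acc k _
  simp [pvStep]

lemma pvGetD_set_self (xs : List Int) (i : Nat) (a : Int) (h : i < xs.length) :
    (xs.set i a).getD i 0 = a := by
  simp [List.getD, h]

lemma pvGetD_set_ne (xs : List Int) (i j : Nat) (a : Int) (h : j ≠ i) :
    (xs.set i a).getD j 0 = xs.getD j 0 := by
  simp [List.getD, List.getElem?_set_ne (Ne.symm h)]

lemma pvStep_foldl_spec (v : List Char) : ∀ (L : Nat) (zs os : List Int),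
    L ≤ zs.length → L ≤ os.length →
    ((List.range L).foldl (pvStep v) (zs, os)).1.length = zs.length ∧
    ((List.range L).foldl (pvStep v) (zs, os)).2.length = os.length ∧
    ∀ k : Nat,
      ((List.range L).foldl (pvStep v) (zs, os)).1.getD k 0
        = zs.getD k 0 + (if k < L ∧ v.getD k '0' = '0' then 1 else 0) ∧
      ((List.range L).foldl (pvStep v) (zs, os)).2.getD k 0
        = os.getD k 0 + (if k < L ∧ ¬ v.getD k '0' = '0' then 1 else 0) := by
  intro L
  induction L with
  | zero => intro zs os _ _; simp
  | succ L ih =>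
    intro zs os hz ho
    obtain ⟨ih1, ih2, ih3⟩ := ih zs os (by omega) (by omega)
    rw [List.range_succ, List.foldl_append]
    set r := (List.range L).foldl (pvStep v) (zs, os) with hr
    simp only [List.foldl_cons, List.foldl_nil]
    unfold pvStep
    by_cases hc : v.getD L '0' = '0'
    · rw [if_pos hc]
      refine ⟨by simp [ih1], ih2, ?_⟩
      intro k
      by_cases hk : k = L
      · subst hk
        refine ⟨?_, ?_⟩
        · rw [pvGetD_set_self _ _ _ (by omega), (ih3 k).1,
            if_neg (fun h => absurd h.1 (Nat.lt_irrefl k)),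
            if_pos ⟨Nat.lt_succ_self k, hc⟩]
          ring
        · rw [(ih3 k).2, if_neg (fun h => h.2 hc), if_neg (fun h => h.2 hc)]
      · refine ⟨?_, ?_⟩
        · have hiff : (k < L ∧ v.getD k '0' = '0') ↔ (k < L + 1 ∧ v.getD k '0' = '0') :=
            and_congr_left' (by omega)
          rw [pvGetD_set_ne _ _ _ _ hk, (ih3 k).1]
          simp only [hiff]
        · have hiff : (k < L ∧ ¬ v.getD k '0' = '0') ↔ (k < L + 1 ∧ ¬ v.getD k '0' = '0') := by
            constructor
            · rintro ⟨h1, h2⟩; exact ⟨by omega, h2⟩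
            · rintro ⟨h1, h2⟩
              refine ⟨?_, h2⟩
              rcases Nat.lt_succ_iff_lt_or_eq.mp h1 with h | h
              · exact h
              · exact absurd hc (h ▸ h2)
          rw [(ih3 k).2]
          simp only [hiff]
    · rw [if_neg hc]
      refine ⟨ih1, by simp [ih2], ?_⟩
      intro k
      by_cases hk : k = L
      · subst hk
        refine ⟨?_, ?_⟩
        · rw [(ih3 k).1, if_neg (fun h => absurd h.1 (Nat.lt_irrefl k)),
            if_neg (fun h => hc h.2)]
        · rw [pvGetD_set_self _ _ _ (by omega), (ih3 k).2,
            if_neg (fun h => absurd h.1 (Nat.lt_irrefl k)),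
            if_pos ⟨Nat.lt_succ_self k, hc⟩]
          ring
      · refine ⟨?_, ?_⟩
        · have hiff : (k < L ∧ v.getD k '0' = '0') ↔ (k < L + 1 ∧ v.getD k '0' = '0') := by
            constructor
            · rintro ⟨h1, h2⟩; exact ⟨by omega, h2⟩
            · rintro ⟨h1, h2⟩
              refine ⟨?_, h2⟩
              rcases Nat.lt_succ_iff_lt_or_eq.mp h1 with h | h
              · exact h
              · exact absurd (h ▸ h2) hc
          rw [(ih3 k).1]
          simp only [hiff]
        · have hiff : (k < L ∧ ¬ v.getD k '0' = '0') ↔ (k < L + 1 ∧ ¬ v.getD k '0' = '0') :=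
            and_congr_left' (by omega)
          rw [pvGetD_set_ne _ _ _ _ hk, (ih3 k).2]
          simp only [hiff]

lemma pvOuter_spec (L : Nat) : ∀ (vs : List String) (zo : List Int × List Int),
    L ≤ zo.1.length → L ≤ zo.2.length →
    ((vs.foldl (fun zo v => (List.range L).foldl (pvStep v.toList) zo) zo).1.length = zo.1.length ∧
     (vs.foldl (fun zo v => (List.range L).foldl (pvStep v.toList) zo) zo).2.length = zo.2.length) ∧
    ∀ k : Nat, k < L →
      (vs.foldl (fun zo v => (List.range L).foldl (pvStep v.toList) zo) zo).1.getD k 0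
        = zo.1.getD k 0 + pvZerosAt vs k ∧
      (vs.foldl (fun zo v => (List.range L).foldl (pvStep v.toList) zo) zo).2.getD k 0
        = zo.2.getD k 0 + pvOnesAt vs k := by
  intro vs
  induction vs with
  | nil => intro zo _ _; simp [pvZerosAt, pvOnesAt]
  | cons v vs ih =>
    rintro ⟨zs, os⟩ hz ho
    dsimp only at hz ho ⊢
    obtain ⟨s1, s2, s3⟩ := pvStep_foldl_spec v.toList L zs os hz ho
    simp only [List.foldl_cons]
    obtain ⟨⟨l1, l2⟩, hrec⟩ := ih ((List.range L).foldl (pvStep v.toList) (zs, os))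
      (by omega) (by omega)
    refine ⟨⟨by rw [l1, s1], by rw [l2, s2]⟩, ?_⟩
    intro k hk
    obtain ⟨r1, r2⟩ := hrec k hk
    obtain ⟨t1, t2⟩ := s3 k
    constructor
    · rw [r1, t1, pvZerosAt, pvZerosAt, List.countP_cons]
      by_cases hc : v.toList.getD k '0' = '0' <;> simp [hc, hk] <;> push_cast <;> ring
    · rw [r2, t2, pvOnesAt, pvOnesAt, List.countP_cons]
      by_cases hc : v.toList.getD k '0' = '0' <;> simp [hc, hk] <;> push_cast <;> ring

-- the lockstep gamma/epsilon loop is two independent folds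
lemma pvGE_fold {α : Type} (n : Int) (c : α → Int) : ∀ (l : List α) (g e : Int),
    l.foldl (fun ge x => if 2 * c x ≥ n then (ge.1 * 2 + 1, ge.2 * 2) else (ge.1 * 2, ge.2 * 2 + 1)) (g, e)
      = (l.foldl (fun g x => g * 2 + (if 2 * c x ≥ n then 1 else 0)) g,
         l.foldl (fun e x => e * 2 + (if 2 * c x ≥ n then 0 else 1)) e) := by
  intro l
  induction l with
  | nil => intro g e; simp
  | cons x l ih =>
    intro g e
    simp only [List.foldl_cons]
    by_cases hc : 2 * c x ≥ n
    · rw [if_pos hc, ih, if_pos hc, if_pos hc, add_zero]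
    · rw [if_neg hc, ih, if_neg hc, if_neg hc, add_zero]

lemma pvGE_sum {α : Type} (n : Int) (c : α → Int) : ∀ (l : List α) (g e : Int),
    l.foldl (fun g x => g * 2 + (if 2 * c x ≥ n then 1 else 0)) g +
      l.foldl (fun e x => e * 2 + (if 2 * c x ≥ n then 0 else 1)) e
      = (g + e + 1) * 2 ^ l.length - 1 := by
  intro l
  induction l with
  | nil => intro g e; simp
  | cons x l ih =>
    intro g e
    simp only [List.foldl_cons, List.length_cons]
    rw [ih]
    by_cases hc : 2 * c x ≥ n
    · rw [if_pos hc, if_pos hc]; ring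
    · rw [if_neg hc, if_neg hc]; ring

-- ========== B-side lemmas ==========

-- the zip width equals len(values[0]) when the first string is shortest
lemma pvFoldlMin_const : ∀ (l : List String) (m : Nat), (∀ w ∈ l, m ≤ w.toList.length) →
    l.foldl (fun m w => min m w.toList.length) m = m := by
  intro l
  induction l with
  | nil => intro m _; rfl
  | cons w l ih =>
    intro m h
    simp only [List.foldl_cons]
    rw [min_eq_left (h w (List.mem_cons_self))]
    exact ih m (fun x hx => h x (List.mem_cons_of_mem w hx))

-- every bool list is a permutation of its falses followed by its trues
lemma pvReplPerm : ∀ (bs : List Bool),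
    (List.replicate (bs.countP (fun b => !b)) false ++
     List.replicate (bs.countP (fun b => b)) true).Perm bs := by
  intro bs
  induction bs with
  | nil => simp
  | cons b t ih =>
    cases b
    · have hz : (false :: t).countP (fun b => !b) = t.countP (fun b => !b) + 1 := by
        simp [List.countP_cons]
      have ht : (false :: t).countP (fun b => b) = t.countP (fun b => b) := by
        simp [List.countP_cons]
      rw [hz, ht, List.replicate_succ, List.cons_append]
      exact List.Perm.cons false ih
    · have hz : (true :: t).countP (fun b => !b) = t.countP (fun b => !b) := by
        simp [List.countP_cons]
      have ht : (true :: t).countP (fun b => b) = t.countP (fun b => b) + 1 := by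
        simp [List.countP_cons]
      rw [hz, ht, List.replicate_succ]
      exact (List.perm_middle).trans (List.Perm.cons true ih)

lemma pvReplSorted (z t : Nat) :
    (List.replicate z false ++ List.replicate t true).Pairwise (fun a b : Bool => a ≤ b) := by
  rw [List.pairwise_append]
  refine ⟨List.pairwise_replicate.mpr (Or.inr le_rfl),
          List.pairwise_replicate.mpr (Or.inr le_rfl), ?_⟩
  intro a ha b hb
  rw [List.eq_of_mem_replicate ha, List.eq_of_mem_replicate hb]
  decide

-- Python's sorted on booleans: all falses, then all trues
lemma pvSortedBool (bs : List Bool) :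
    PySem.List.sorted bs (fun x => x) false
      = List.replicate (bs.countP (fun b => !b)) false ++
        List.replicate (bs.countP (fun b => b)) true :=
  PySem.List.sorted_id_eq_of_perm_of_pairwise _ _ (pvReplPerm bs) (pvReplSorted _ _)

-- the median of z falses followed by t trues is the majority bit with the tie-to-one rule
lemma pvMedian (z t N : Nat) (h : z + t = N) (h1 : 1 ≤ N) :
    (List.replicate z false ++ List.replicate t true).getD (N / 2) false
      = decide (N ≤ 2 * t) := by
  rcases Nat.lt_or_ge (N / 2) z with hlt | hge
  · rw [List.getD_eq_getElem _ _ (by simp; omega), List.getElem_append_left (by simpa using hlt)]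
    simp only [List.getElem_replicate]
    symm; simpa using (by omega : ¬ N ≤ 2 * t)
  · rw [List.getD_eq_getElem _ _ (by simp; omega),
      List.getElem_append_right (by simpa using hge)]
    simp only [List.getElem_replicate]
    symm; simpa using (by omega : N ≤ 2 * t)

-- splitting B's (gamma, width) pair fold
lemma pvFoldPair (f : Int → List Char → Int) : ∀ (l : List (List Char)) (g w : Int),
    l.foldl (fun gw col => (f gw.1 col, gw.2 + 1)) (g, w)
      = (l.foldl f g, w + (l.length : Int)) := by
  intro l
  induction l with
  | nil => intro g w; simp
  | cons c l ih =>
    intro g w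
    simp only [List.foldl_cons, ih, List.length_cons]
    refine Prod.ext rfl ?_
    push_cast; ring

-- ===== VERDICT (by name: the statement is the Claim_ definition above) =====
set_option maxHeartbeats 1000000 in
theorem pvMainEq (v : String) (vs : List String)
    (hmin : ∀ w ∈ (v :: vs), v.toList.length ≤ w.toList.length) :
    compute_puzzle1 (v :: vs) = compute_puzzle1_alt (v :: vs) := by
  unfold compute_puzzle1 compute_puzzle1_alt
  simp only []
  rw [PySem.List.pyGetD_zero_cons]
  set L : Nat := v.toList.length with hL
  have hlen : PySem.Str.len v = (L : Int) := by rw [PySem.Str.len_eq]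
  rw [hlen]
  set N : Nat := (v :: vs).length with hN
  have hN1 : 1 ≤ N := by simp [hN]
  -- ===== A side =====
  rw [PySem.List.pyRepeat_singleton]
  have hrepL : (Int.toNat (L : Int)) = L := by omega
  rw [hrepL]
  simp only [pvInner_bridge]
  set counts := (v :: vs).foldl (fun zo w => (List.range L).foldl (pvStep w.toList) zo)
      (List.replicate L (0 : Int), List.replicate L (0 : Int)) with hcounts
  obtain ⟨-, hcnt⟩ := pvOuter_spec L (v :: vs)
      (List.replicate L (0 : Int), List.replicate L (0 : Int)) (by simp) (by simp)
  have hzn : ∀ k : Nat, pvZerosAt (v :: vs) k + pvOnesAt (v :: vs) k = (N : Int) := by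
    intro k
    have := pvCountP_split (v :: vs) (fun w => decide (w.toList.getD k '0' = '0'))
    simp only [pvZerosAt, pvOnesAt, hN]
    exact_mod_cast this
  rw [PySem.List.pyRange_zero_nat, List.foldl_map]
  set F := (fun (ge : Int × Int) (k : Nat) =>
      if PySem.List.pyGetD counts.1 ((k : Nat) : Int) 0 > PySem.List.pyGetD counts.2 ((k : Nat) : Int) 0 then
        (ge.1 * 2, ge.2 * 2 + 1)
      else
        (ge.1 * 2 + 1, ge.2 * 2)) with hF
  have hbody2 : ∀ (ge : Int × Int) (k : Nat), k ∈ List.range L →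
      F ge k = (fun (ge : Int × Int) (k : Nat) =>
        if 2 * pvOnesAt (v :: vs) k ≥ (N : Int) then (ge.1 * 2 + 1, ge.2 * 2)
        else (ge.1 * 2, ge.2 * 2 + 1)) ge k := by
    intro ge k hk
    have hkL : k < L := List.mem_range.mp hk
    obtain ⟨c1, c2⟩ := hcnt k hkL
    dsimp only at c1 c2
    rw [← hcounts] at c1 c2
    have hz := hzn k
    rw [hF]
    simp only [PySem.List.pyGetD_natCast, c1, c2]
    by_cases hc : 2 * pvOnesAt (v :: vs) k ≥ (N : Int)
    · rw [if_neg (by omega), if_pos hc]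
    · rw [if_pos (by omega), if_neg hc]
  have hkey : (List.range L).foldl F (0, 0)
      = (List.range L).foldl (fun (ge : Int × Int) (k : Nat) =>
          if 2 * pvOnesAt (v :: vs) k ≥ (N : Int) then (ge.1 * 2 + 1, ge.2 * 2)
          else (ge.1 * 2, ge.2 * 2 + 1)) (0, 0) :=
    PySem.List.foldl_congr_mem _ _ _ _ hbody2
  rw [hkey, pvGE_fold (N : Int) (fun k => pvOnesAt (v :: vs) k) (List.range L) 0 0]
  dsimp only
  set G := (List.range L).foldl
    (fun (g : Int) (k : Nat) => g * 2 + (if 2 * pvOnesAt (v :: vs) k ≥ (N : Int) then 1 else 0)) 0 with hG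
  set E := (List.range L).foldl
    (fun (e : Int) (k : Nat) => e * 2 + (if 2 * pvOnesAt (v :: vs) k ≥ (N : Int) then 0 else 1)) 0 with hE
  have hsum := pvGE_sum (N : Int) (fun k => pvOnesAt (v :: vs) k) (List.range L) 0 0
  rw [List.length_range] at hsum
  have hEe : E = 2 ^ L - 1 - G := by rw [hG, hE]; linarith [hsum]
  -- ===== B side =====
  have hminlen : pvMinLen (v :: vs) = L := by
    unfold pvMinLen
    exact pvFoldlMin_const vs v.toList.length
      (fun w hw => hmin w (List.mem_cons_of_mem v hw))
  have hcols : pvZipCols (v :: vs)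
      = (List.range L).map (fun k => (v :: vs).map (fun w => w.toList.getD k ' ')) := by
    unfold pvZipCols; rw [hminlen]
  rw [hcols]
  have hBpair : (List.foldl
        (fun (gw : Int × Int) (col : List Char) =>
          let bits : List Bool :=
            PySem.List.sorted (col.map (fun c => decide (c ≠ '0'))) (fun x => x) false
          (2 * gw.1 + (if PySem.List.pyGetD bits (PySem.Int.floordiv ((N : Nat) : Int) 2) false then 1 else 0),
           gw.2 + 1))
        ((0 : Int), (0 : Int))
        ((List.range L).map (fun k => (v :: vs).map (fun w => w.toList.getD k ' '))))
      = (((List.range L).map (fun k => (v :: vs).map (fun w => w.toList.getD k ' '))).foldl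
          (fun (g : Int) (col : List Char) => 2 * g +
            (if PySem.List.pyGetD
                (PySem.List.sorted (col.map (fun c => decide (c ≠ '0'))) (fun x => x) false)
                (PySem.Int.floordiv ((N : Nat) : Int) 2) false then 1 else 0)) 0,
         0 + (((List.range L).map (fun k => (v :: vs).map (fun w => w.toList.getD k ' '))).length : Int)) :=
    pvFoldPair (fun (g : Int) (col : List Char) => 2 * g +
            (if PySem.List.pyGetD
                (PySem.List.sorted (col.map (fun c => decide (c ≠ '0'))) (fun x => x) false)
                (PySem.Int.floordiv ((N : Nat) : Int) 2) false then 1 else 0)) _ 0 0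
  rw [hBpair, List.foldl_map, List.length_map, List.length_range]
  dsimp only
  have hdiv : PySem.Int.floordiv ((N : Nat) : Int) 2 = ((N / 2 : Nat) : Int) := by
    exact_mod_cast PySem.Int.floordiv_natCast N 2
  have hGB : (List.range L).foldl (fun (g : Int) (k : Nat) => 2 * g +
      (if PySem.List.pyGetD
          (PySem.List.sorted (((v :: vs).map (fun w => w.toList.getD k ' ')).map
            (fun c => decide (c ≠ '0'))) (fun x => x) false)
          (PySem.Int.floordiv ((N : Nat) : Int) 2) false then 1 else 0)) 0 = G := by
    rw [hG]
    apply PySem.List.foldl_congr_mem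
    intro g k hk
    have hkL : k < L := List.mem_range.mp hk
    have hcond : PySem.List.pyGetD
        (PySem.List.sorted (((v :: vs).map (fun w => w.toList.getD k ' ')).map
          (fun c => decide (c ≠ '0'))) (fun x => x) false)
        (PySem.Int.floordiv ((N : Nat) : Int) 2) false
        = decide (((N : Nat) : Int) ≤ 2 * pvOnesAt (v :: vs) k) := by
      rw [List.map_map]
      simp only [Function.comp_def]
      set bs := (v :: vs).map (fun w => decide (w.toList.getD k ' ' ≠ '0')) with hbs
      have hsplit := pvCountP_split bs (fun b => b)
      set t := bs.countP (fun b => b) with ht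
      set z := bs.countP (fun b => !b) with hz
      have hzt : z + t = N := by
        have hlenbs : bs.length = N := by rw [hbs, List.length_map, hN]
        omega
      have htones : (t : Int) = pvOnesAt (v :: vs) k := by
        rw [ht, hbs, List.countP_map, pvOnesAt]
        congr 1
        apply List.countP_congr
        intro w hw
        have hkw : k < w.toList.length := lt_of_lt_of_le hkL (hmin w hw)
        simp only [Function.comp]
        rw [List.getD_eq_getElem _ _ hkw, List.getD_eq_getElem _ _ hkw]
        by_cases hc : w.toList[k] = '0' <;> simp [hc]
      rw [pvSortedBool, hdiv, PySem.List.pyGetD_natCast, ← hz, ← ht,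
        pvMedian z t N hzt hN1, ← htones]
      simp only [decide_eq_decide]
      omega
    simp only [hcond, decide_eq_true_eq]
    by_cases hc : ((N : Nat) : Int) ≤ 2 * pvOnesAt (v :: vs) k
    · ring
    · ring
  rw [hGB, hEe]
  have hsh : ((1 : Int) <<< (Int.toNat ((0 : Int) + (L : Nat)))) = 2 ^ L := by
    rw [show Int.toNat ((0 : Int) + (L : Nat)) = L by omega, Int.shiftLeft_eq]; ring
  rw [hsh]

theorem compute_puzzle1_spec : Claim_equal_compute_puzzle1 := by
  intro values _ hpre
  obtain ⟨hne, hmin⟩ := hpre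
  unfold Spec_compute_puzzle1
  cases values with
  | nil => exact absurd rfl hne
  | cons v vs =>
    exact pvMainEq v vs (by simpa using hmin)
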